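-- pv_equiv track=rewrite | github.com/kvm777/python-codes-for-practice | unknown/IBM/clousernum.py | clousersum
-- ===== SOURCE A (Python) =====
-- def clousersum(inputNum):
--     #write your code here
--     # convert the integer to string
--     n=str(inputNum) #"12345"
--     l=len(n)        # 5
--     x=0
--     # if l%2==0:
--         # for i in range(l//2):
--         #     k=int(n[i]+n[l-1-i]) # 4-1  = 3
--         #     x+=k
--     # else:
--     #     for i in range(l//2): #1234567 , l = 7, l//2 = 3, 0->2
--     #         k=int(n[i]+n[l-1-i])
--     #         x+=k
--     #     x+=int(n[l//2])
--
--     for i in range(l//2):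
--         k=int(n[i]+n[l-1-i])
--         x+=k
--
--
--     if l%2 !=0:
--         x+= int(n[l//2])
--
--     return x
-- ===== SOURCE B (Python) =====
-- def clousersum(inputNum):
--     def helper(s):
--         if len(s) == 0:
--             return 0
--         if len(s) == 1:
--             return int(s)
--         return int(s[0] + s[-1]) + helper(s[1:-1])
--     return helper(str(inputNum))
-- ===== Notes on version B (the rewrite author's own statement) =====
-- stated objective: alternative
-- what changed: Replaces the index-based loop over range(l//2) plus a separate odd-length middle branch with a recursion on the string that peels the two outer characters each step (the middle digit falls out of the len==1 base case).
import Mathlib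
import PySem

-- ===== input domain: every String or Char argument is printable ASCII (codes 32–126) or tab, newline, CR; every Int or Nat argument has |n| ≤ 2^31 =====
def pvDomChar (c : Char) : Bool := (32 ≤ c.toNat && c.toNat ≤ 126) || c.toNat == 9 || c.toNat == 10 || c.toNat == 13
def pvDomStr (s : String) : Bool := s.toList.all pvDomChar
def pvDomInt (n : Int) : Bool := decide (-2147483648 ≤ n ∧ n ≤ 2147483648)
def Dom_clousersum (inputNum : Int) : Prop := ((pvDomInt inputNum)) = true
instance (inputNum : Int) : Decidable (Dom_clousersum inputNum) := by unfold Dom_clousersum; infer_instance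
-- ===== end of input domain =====

-- B replaces A's index loop over range(l//2) plus a separate odd-length middle branch with a
-- recursion on the string that peels the two outer characters each step; same cost, different
-- decomposition. Both ports use `.getD`-defaults only at spots where the Python never raises
-- (every index is in range and every indexed one- or two-character string parses with int()).

-- ===== PORT A =====
def clousersum (inputNum : Int) : Int :=
  -- n = str(inputNum)
  let n : List Char := PySem.Int.toChars inputNum
  -- l = len(n)
  let l : Int := (n.length : Int)
  -- x = 0
  let x : Int := 0
  -- for i in range(l//2): k = int(n[i] + n[l-1-i]); x += k
  let x := (PySem.List.pyRange 0 (PySem.Int.floordiv l 2) 1).foldl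
    (fun x i =>
      let k : Int := (PySem.Int.ofChars?
        [(PySem.List.pyGet? n i).getD ' ', (PySem.List.pyGet? n (l - 1 - i)).getD ' ']).getD 0
      x + k) x
  -- if l % 2 != 0: x += int(n[l//2])
  let x := if PySem.Int.mod l 2 ≠ 0 then
      x + (PySem.Int.ofChars? [(PySem.List.pyGet? n (PySem.Int.floordiv l 2)).getD ' ']).getD 0
    else x
  x

-- ===== PORT B =====
-- s[1:-1] is s.tail.dropLast (cited by the port's termination proof)
theorem pvSlice_one_negOne (s : List Char) :
    PySem.List.slice s (some 1) (some (-1)) = s.tail.dropLast := by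
  cases s with
  | nil => rfl
  | cons c t =>
    simp [PySem.List.slice, PySem.List.clampIdx, List.dropLast_eq_take, List.tail]
    split_ifs with h
    · omega
    · omega

-- helper(s): 0 if len(s)==0; int(s) if len(s)==1; else int(s[0]+s[-1]) + helper(s[1:-1])
def pvHelper (s : List Char) : Int :=
  if s.length = 0 then 0
  else if s.length = 1 then (PySem.Int.ofChars? s).getD 0
  else (PySem.Int.ofChars?
         [(PySem.List.pyGet? s 0).getD ' ', (PySem.List.pyGet? s (-1)).getD ' ']).getD 0
       + pvHelper (PySem.List.slice s (some 1) (some (-1)))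
termination_by s.length
decreasing_by
  rw [pvSlice_one_negOne]
  simp only [List.length_dropLast, List.length_tail]
  omega

def clousersum_alt (inputNum : Int) : Int :=
  pvHelper (PySem.Int.toChars inputNum)

-- ===== PRECONDITION & SPEC =====
def Spec_clousersum (inputNum : Int) (out : Int) : Prop := out = clousersum_alt inputNum
instance (inputNum : Int) (out : Int) : Decidable (Spec_clousersum inputNum out) := by unfold Spec_clousersum; infer_instance

-- ===== CLAIM (what is proved, stated in full; the proofs are below) =====
def Claim_equal_clousersum : Prop := ∀ (inputNum : Int), Dom_clousersum inputNum → Spec_clousersum inputNum (clousersum inputNum)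

-- ===== LEMMAS AND PROOFS =====

-- the symmetric pair int(n[i] + n[l-1-i]) read at a Nat index
def pvPair (s : List Char) (i : Nat) : Int :=
  (PySem.Int.ofChars?
    [(PySem.List.pyGet? s (i : Int)).getD ' ',
     (PySem.List.pyGet? s ((s.length : Int) - 1 - (i : Int))).getD ' ']).getD 0

-- A's body as a function of the char list (definitionally the body of `clousersum`)
def pvAval (s : List Char) : Int :=
  let l : Int := (s.length : Int)
  let x : Int := 0
  let x := (PySem.List.pyRange 0 (PySem.Int.floordiv l 2) 1).foldl
    (fun x i =>
      let k : Int := (PySem.Int.ofChars?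
        [(PySem.List.pyGet? s i).getD ' ', (PySem.List.pyGet? s (l - 1 - i)).getD ' ']).getD 0
      x + k) x
  let x := if PySem.Int.mod l 2 ≠ 0 then
      x + (PySem.Int.ofChars? [(PySem.List.pyGet? s (PySem.Int.floordiv l 2)).getD ' ']).getD 0
    else x
  x

theorem pvAval_sum (s : List Char) :
    pvAval s = ((List.range (s.length / 2)).map (pvPair s)).sum
      + (if s.length % 2 ≠ 0 then
          (PySem.Int.ofChars? [(PySem.List.pyGet? s ((s.length / 2 : Nat) : Int)).getD ' ']).getD 0
        else 0) := by
  unfold pvAval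
  dsimp only
  rw [show PySem.Int.floordiv (s.length:Int) 2 = ((s.length/2 : Nat) : Int) from by
    exact_mod_cast PySem.Int.floordiv_natCast s.length 2]
  rw [show PySem.Int.mod (s.length:Int) 2 = ((s.length % 2 : Nat) : Int) from by
    exact_mod_cast PySem.Int.mod_natCast s.length 2]
  rw [PySem.List.pyRange_zero_natCast]
  simp only [PySem.List.foldl_add, List.map_map, zero_add, Nat.cast_ne_zero]
  split_ifs with h
  · rfl
  · exact (add_zero _).symm

theorem pvInner (s : List Char) (j : Nat) (hj : j < s.length - 2) :
    s.tail.dropLast[j]? = s[j + 1]? := by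
  rw [List.getElem?_dropLast, List.getElem?_tail, if_pos (by simp; omega)]

theorem pvPair_shift (s : List Char) (i : Nat) (hi : i < s.length - 2) :
    pvPair s (i + 1) = pvPair s.tail.dropLast i := by
  have ht : s.tail.dropLast.length = s.length - 2 := by simp; omega
  unfold pvPair
  rw [ht]
  rw [show ((s.length : Int) - 1 - ((i + 1 : Nat) : Int)) = ((s.length - 2 - i : Nat) : Int) by omega]
  rw [show (((s.length - 2 : Nat) : Int) - 1 - (i : Nat)) = ((s.length - 3 - i : Nat) : Int) by omega]
  simp only [PySem.List.pyGet?_natCast]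
  rw [pvInner s i hi, pvInner s (s.length - 3 - i) (by omega)]
  rw [show s.length - 3 - i + 1 = s.length - 2 - i by omega]

theorem pvAval_step (s : List Char) (h : 2 ≤ s.length) :
    pvAval s = pvPair s 0 + pvAval s.tail.dropLast := by
  have ht : s.tail.dropLast.length = s.length - 2 := by simp; omega
  rw [pvAval_sum, pvAval_sum, ht]
  have hrange : List.range (s.length / 2) = 0 :: (List.range (s.length / 2 - 1)).map Nat.succ := by
    rw [← List.range_succ_eq_map]
    congr 1
    omega
  rw [hrange]
  simp only [List.map_cons, List.map_map, List.sum_cons]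
  have hmap : (List.range (s.length / 2 - 1)).map (pvPair s ∘ Nat.succ)
      = (List.range (s.length / 2 - 1)).map (pvPair s.tail.dropLast) := by
    apply List.map_congr_left
    intro i hi
    rw [List.mem_range] at hi
    exact pvPair_shift s i (by omega)
  rw [hmap]
  have hdiv : (s.length - 2) / 2 = s.length / 2 - 1 := by omega
  rw [hdiv, add_assoc]
  congr 1
  by_cases hodd : s.length % 2 = 0
  · rw [if_neg (by omega), if_neg (by omega)]
  · rw [if_pos hodd, if_pos (show (s.length - 2) % 2 ≠ 0 by omega)]
    have hmid : s.tail.dropLast[s.length / 2 - 1]? = s[s.length / 2]? := by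
      rw [pvInner s (s.length / 2 - 1) (by omega)]
      congr 1
      omega
    simp only [PySem.List.pyGet?_natCast]
    rw [hmid]

theorem pvHelper_step (s : List Char) (h : 2 ≤ s.length) :
    pvHelper s = pvPair s 0 + pvHelper s.tail.dropLast := by
  rw [pvHelper, if_neg (by omega), if_neg (by omega), pvSlice_one_negOne]
  congr 1
  unfold pvPair
  rw [show ((s.length : Int) - 1 - ((0 : Nat) : Int)) = ((s.length - 1 : Nat) : Int) by omega]
  simp only [PySem.List.pyGet?_natCast, PySem.List.pyGet?_neg_one, Nat.cast_zero,
    List.getLast?_eq_getElem?]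

theorem pvAval_eq_pvHelper_aux : ∀ (N : Nat) (s : List Char), s.length ≤ N → pvAval s = pvHelper s := by
  intro N
  induction N with
  | zero =>
    intro s hs
    have h0 : s = [] := List.eq_nil_of_length_eq_zero (by omega)
    subst h0
    rw [pvAval_sum, pvHelper]
    simp
  | succ N ih =>
    intro s hs
    by_cases h0 : s.length = 0
    · have h0' : s = [] := List.eq_nil_of_length_eq_zero h0
      subst h0'
      rw [pvAval_sum, pvHelper]
      simp
    · by_cases h1 : s.length = 1
      · obtain ⟨c, hc⟩ : ∃ c, s = [c] := by
          cases s with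
          | nil => simp at h1
          | cons c t =>
            refine ⟨c, ?_⟩
            cases t with
            | nil => rfl
            | cons d u => simp at h1
        subst hc
        rw [pvAval_sum]
        simp [pvHelper]
      · have h2 : 2 ≤ s.length := by omega
        rw [pvAval_step s h2, pvHelper_step s h2]
        exact congrArg (pvPair s 0 + ·) (ih s.tail.dropLast (by simp; omega))

theorem pvAval_eq_pvHelper (s : List Char) : pvAval s = pvHelper s :=
  pvAval_eq_pvHelper_aux s.length s le_rfl

-- ===== VERDICT (by name: the statement is the Claim_ definition above) =====
theorem clousersum_spec : Claim_equal_clousersum := by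
  intro inputNum _
  unfold Spec_clousersum clousersum clousersum_alt
  exact pvAval_eq_pvHelper (PySem.Int.toChars inputNum)
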